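-- pv_equiv track=rewrite | github.com/vikrambhatt1405/ThesisPythonModules | HeuristicMethod/Heurisitc.py | maximum_gain_swaps
-- ===== SOURCE A (Python) =====
-- def maximum_gain_swaps(gains):
--     max_sum = gains[0]
--     max_pos = 0
--     sum = 0
--     for idx, i in enumerate(gains):
--         sum += i
--         if sum > max_sum:
--             max_sum = sum
--             max_pos = idx
--     return max_pos, max_sum
-- ===== SOURCE B (Python) =====
-- def maximum_gain_swaps(gains):
--     # Build the full prefix-sum table, then take max and its first index.
--     sums = []
--     total = 0
--     for g in gains:
--         total += g
--         sums.append(total)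
--     best = max(sums)
--     return sums.index(best), best
-- ===== Notes on version B (the rewrite author's own statement) =====
-- stated objective: idiomatic
-- what changed: Replaces the fused running-sum/argmax loop by a two-phase decomposition: build the prefix-sum table, then obtain the answer with max() and .index() (first maximum, matching A's strict '>' tie-break).
-- outside the precondition, e.g. on maximum_gain_swaps([]): A raises IndexError, B raises ValueError
import Mathlib
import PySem

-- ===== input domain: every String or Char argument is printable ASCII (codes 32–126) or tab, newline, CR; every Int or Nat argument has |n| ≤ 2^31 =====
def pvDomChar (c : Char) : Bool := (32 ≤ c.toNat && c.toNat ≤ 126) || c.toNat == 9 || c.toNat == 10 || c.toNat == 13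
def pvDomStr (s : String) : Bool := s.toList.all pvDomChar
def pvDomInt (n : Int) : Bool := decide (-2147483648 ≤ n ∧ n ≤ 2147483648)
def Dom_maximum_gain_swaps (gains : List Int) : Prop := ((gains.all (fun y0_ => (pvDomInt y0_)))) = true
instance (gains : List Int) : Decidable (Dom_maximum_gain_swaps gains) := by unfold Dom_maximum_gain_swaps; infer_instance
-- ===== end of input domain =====

-- B replaces A's fused running-sum/argmax loop by a two-phase decomposition (prefix-sum table, then max/.index); same cost, more idiomatic. Pre_ excludes [] (A raises IndexError, B ValueError).


-- ===== PORT A =====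
def maximum_gain_swaps (gains : List Int) : Int × Int :=
  -- max_sum = gains[0] (Pre_ excludes []); state = ((max_pos, max_sum), sum)
  let max_sum : Int := gains.headD 0
  let st := (PySem.List.enumerate gains 0).foldl
    (fun (st : (Int × Int) × Int) (p : Int × Int) =>
      let s := st.2 + p.2
      if s > st.1.2 then ((p.1, s), s) else (st.1, s))
    ((0, max_sum), 0)
  (st.1.1, st.1.2)

-- ===== PORT B =====
-- prefix-sum table (Source B's first loop): state = (sums, total)
def pvPrefixSums (gains : List Int) : List Int :=
  (gains.foldl (fun (st : List Int × Int) g =>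
    let t := st.2 + g
    (st.1 ++ [t], t)) ([], 0)).1

def maximum_gain_swaps_alt (gains : List Int) : Int × Int :=
  let sums := pvPrefixSums gains
  match PySem.List.max? sums (fun y => y) with
  | none => (0, 0)   -- Python max([]) raises ValueError; Pre_ excludes []
  | some best => (((PySem.List.index? sums best).getD 0 : Nat), best)

-- ===== PRECONDITION & SPEC =====
-- Pre_ excludes the empty list, on which A raises IndexError (gains[0]) and B raises ValueError (max([])).
def Pre_maximum_gain_swaps (gains : List Int) : Prop := gains ≠ []
instance (gains : List Int) : Decidable (Pre_maximum_gain_swaps gains) := by unfold Pre_maximum_gain_swaps; infer_instance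
def pvWitness_maximum_gain_swaps : List Int := [1, -2, 3]
def Spec_maximum_gain_swaps (gains : List Int) (out : Int × Int) : Prop := out = maximum_gain_swaps_alt gains
instance (gains : List Int) (out : Int × Int) : Decidable (Spec_maximum_gain_swaps gains out) := by unfold Spec_maximum_gain_swaps; infer_instance

-- ===== CLAIM (what is proved, stated in full; the proofs are below) =====
def Claim_equal_maximum_gain_swaps : Prop := ∀ (gains : List Int), Dom_maximum_gain_swaps gains → Pre_maximum_gain_swaps gains → Spec_maximum_gain_swaps gains (maximum_gain_swaps gains)

-- ===== LEMMAS AND PROOFS =====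

-- prefix sums, structurally
def pvScan (t : Int) : List Int → List Int
  | [] => []
  | g :: gs => (t + g) :: pvScan (t + g) gs

lemma pvPrefixSums_foldl (l : List Int) : ∀ (acc : List Int) (t : Int),
    (l.foldl (fun (st : List Int × Int) g => ((st.1 ++ [st.2 + g], st.2 + g) : List Int × Int)) (acc, t)).1
      = acc ++ pvScan t l := by
  induction l with
  | nil => intro acc t; simp [pvScan]
  | cons g gs ih =>
      intro acc t
      simp only [List.foldl_cons, pvScan]
      rw [ih]
      simp

lemma pvPrefixSums_eq (gains : List Int) : pvPrefixSums gains = pvScan 0 gains := by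
  have := pvPrefixSums_foldl gains [] 0
  simpa [pvPrefixSums] using this

-- the argmax loop A performs, abstracted over the prefix-sum list
def pvAmLoop (i pos m : Int) : List Int → Int × Int
  | [] => (pos, m)
  | x :: xs => if x > m then pvAmLoop (i + 1) i x xs else pvAmLoop (i + 1) pos m xs

lemma foldA_eq_amLoop (l : List Int) : ∀ (i pos m t : Int),
    ((PySem.List.enumerate l i).foldl
      (fun (st : (Int × Int) × Int) (p : Int × Int) =>
        let s := st.2 + p.2
        if s > st.1.2 then ((p.1, s), s) else (st.1, s))
      ((pos, m), t)).1
    = pvAmLoop i pos m (pvScan t l) := by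
  induction l with
  | nil => intro i pos m t; simp [PySem.List.enumerate_nil, pvScan, pvAmLoop]
  | cons g gs ih =>
      intro i pos m t
      rw [PySem.List.enumerate_cons]
      simp only [List.foldl_cons, pvScan, pvAmLoop]
      by_cases h : t + g > m
      · simp only [h, if_pos h]; exact ih (i+1) i (t+g) (t+g)
      · simp only [if_neg h]; exact ih (i+1) pos m (t+g)

-- running max facts
lemma foldl_max_eq_of_le (xs : List Int) : ∀ (a : Int), (∀ y ∈ xs, y ≤ a) → xs.foldl max a = a := by
  induction xs with
  | nil => intro a _; rfl
  | cons x t ih =>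
      intro a h
      simp only [List.foldl_cons]
      have hx : x ≤ a := h x (by simp)
      have : max a x = a := by omega
      rw [this]
      exact ih a (fun y hy => h y (by simp [hy]))

lemma le_foldl_max (xs : List Int) : ∀ (a : Int), a ≤ xs.foldl max a := by
  induction xs with
  | nil => intro a; simp
  | cons x t ih =>
      intro a
      simp only [List.foldl_cons]
      have := ih (max a x)
      omega

lemma foldl_max_mem (xs : List Int) : ∀ (a : Int), xs.foldl max a = a ∨ xs.foldl max a ∈ xs := by
  induction xs with
  | nil => intro a; left; rfl
  | cons x t ih =>
      intro a
      simp only [List.foldl_cons]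
      rcases ih (max a x) with h | h
      · rw [h]
        rcases le_or_gt x a with hxa | hxa
        · left; omega
        · right
          have hx : max a x = x := by omega
          rw [hx]
          exact List.mem_cons_self
      · right; right; exact h

lemma mem_le_foldl_max (xs : List Int) : ∀ (a : Int) (y : Int), y ∈ xs → y ≤ xs.foldl max a := by
  induction xs with
  | nil => intro a y hy; cases hy
  | cons x t ih =>
      intro a y hy
      simp only [List.foldl_cons]
      rcases List.mem_cons.mp hy with h | h
      · subst h
        have := le_foldl_max t (max a y)
        omega
      · exact ih (max a x) y h

-- the core characterisation of the argmax loop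
lemma amLoop_char (t : List Int) : ∀ (i pos m : Int),
    pvAmLoop i pos m t =
      if ∀ y ∈ t, y ≤ m then (pos, m)
      else (i + (((PySem.List.index? t (t.foldl max m)).getD 0 : Nat) : Int), t.foldl max m) := by
  induction t with
  | nil => intro i pos m; simp [pvAmLoop]
  | cons x xs ih =>
      intro i pos m
      simp only [pvAmLoop]
      by_cases hx : x > m
      · rw [if_pos hx, ih]
        have hne : ¬ ∀ y ∈ x :: xs, y ≤ m := by
          intro h; exact absurd (h x (by simp)) (by omega)
        rw [if_neg hne]
        have hfold : (x :: xs).foldl max m = xs.foldl max x := by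
          simp only [List.foldl_cons]
          congr 1
          omega
        by_cases hall : ∀ y ∈ xs, y ≤ x
        · rw [if_pos hall]
          have hMx : xs.foldl max x = x := foldl_max_eq_of_le xs x hall
          rw [hfold, hMx, PySem.List.index?_cons_self]
          simp
        · rw [if_neg hall]
          push_neg at hall
          obtain ⟨y, hy, hylt⟩ := hall
          have hM : x < xs.foldl max x := by
            have := mem_le_foldl_max xs x y hy
            omega
          have hMmem : xs.foldl max x ∈ xs := by
            rcases foldl_max_mem xs x with h | h
            · omega
            · exact h
          rw [hfold]
          have hne2 : x ≠ xs.foldl max x := by omega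
          rw [PySem.List.index?_cons_of_ne _ hne2]
          obtain ⟨k, hk⟩ := Option.isSome_iff_exists.mp
            ((PySem.List.index?_isSome_iff xs (xs.foldl max x)).mpr hMmem)
          rw [hk]
          simp only [Option.map_some, Option.getD_some]
          rw [Prod.mk.injEq]
          exact ⟨by push_cast; ring, rfl⟩
      · rw [if_neg hx, ih]
        have hxm : x ≤ m := by omega
        have hfold : (x :: xs).foldl max m = xs.foldl max m := by
          simp only [List.foldl_cons]
          congr 1
          omega
        by_cases hall : ∀ y ∈ xs, y ≤ m
        · have hcons : ∀ y ∈ x :: xs, y ≤ m := by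
            intro y hy
            rcases List.mem_cons.mp hy with h | h
            · omega
            · exact hall y h
          rw [if_pos hall, if_pos hcons]
        · rw [if_neg hall, if_neg (by intro h; exact hall (fun y hy => h y (by simp [hy])))]
          push_neg at hall
          obtain ⟨y, hy, hylt⟩ := hall
          have hM : m < xs.foldl max m := by
            have := mem_le_foldl_max xs m y hy
            omega
          have hMmem : xs.foldl max m ∈ xs := by
            rcases foldl_max_mem xs m with h | h
            · omega
            · exact h
          rw [hfold]
          have hne2 : x ≠ xs.foldl max m := by omega
          rw [PySem.List.index?_cons_of_ne _ hne2]
          obtain ⟨k, hk⟩ := Option.isSome_iff_exists.mp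
            ((PySem.List.index?_isSome_iff xs (xs.foldl max m)).mpr hMmem)
          rw [hk]
          simp only [Option.map_some, Option.getD_some]
          rw [Prod.mk.injEq]
          exact ⟨by push_cast; ring, rfl⟩

-- first-index fact used at the head of the prefix-sum list
lemma idx_getD_cons_ne (x v : Int) (xs : List Int) (h : x ≠ v) (hm : v ∈ xs) :
    (((PySem.List.index? (x :: xs) v).getD 0 : Nat) : Int)
      = 1 + (((PySem.List.index? xs v).getD 0 : Nat) : Int) := by
  rw [PySem.List.index?_cons_of_ne _ h]
  obtain ⟨k, hk⟩ := Option.isSome_iff_exists.mp ((PySem.List.index?_isSome_iff xs v).mpr hm)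
  rw [hk]
  simp only [Option.map_some, Option.getD_some]
  push_cast; ring

-- ===== VERDICT (by name: the statement is the Claim_ definition above) =====
theorem maximum_gain_swaps_spec : Claim_equal_maximum_gain_swaps := by
  intro gains _ hpre
  unfold Spec_maximum_gain_swaps
  obtain ⟨g, gs, rfl⟩ := List.exists_cons_of_ne_nil hpre
  unfold maximum_gain_swaps maximum_gain_swaps_alt
  simp only [List.headD_cons]
  rw [foldA_eq_amLoop]
  rw [pvPrefixSums_eq]
  have hscan : pvScan 0 (g :: gs) = g :: pvScan g gs := by simp [pvScan]
  rw [hscan]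
  set t := pvScan g gs with ht
  -- unfold one step of the loop: first prefix sum equals the initial max_sum g
  have hstep : pvAmLoop 0 0 g (g :: t) = pvAmLoop 1 0 g t := by
    simp [pvAmLoop]
  rw [hstep, amLoop_char]
  rw [PySem.List.max?_id_cons]
  show _ = ((((PySem.List.index? (g :: t) (t.foldl max g)).getD 0 : Nat) : Int), t.foldl max g)
  by_cases hall : ∀ y ∈ t, y ≤ g
  · rw [if_pos hall]
    have hM : t.foldl max g = g := foldl_max_eq_of_le t g hall
    rw [hM, PySem.List.index?_cons_self]
    simp
  · rw [if_neg hall]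
    push_neg at hall
    obtain ⟨y, hy, hylt⟩ := hall
    have hM : g < t.foldl max g := by
      have := mem_le_foldl_max t g y hy
      omega
    have hMmem : t.foldl max g ∈ t := by
      rcases foldl_max_mem t g with h | h
      · omega
      · exact h
    have hne2 : g ≠ t.foldl max g := by omega
    rw [idx_getD_cons_ne g _ t hne2 hMmem]
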